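-- pv_equiv track=rewrite | github.com/gklee555/excelWokbookDiff | multidiff.py | secondary_changes
-- ===== SOURCE A (Python) =====
-- def secondary_changes(difflist):
--     changes = {}
--     for diff in difflist:
--         type = diff[0]
--         name_delim = diff.find(",")
--         name = diff[2:name_delim]
--         values = diff[name_delim+1:]
--         if(type=="+"):
--             changes[name]=values #when their is an "+" diff the change value
--         elif((type=="-") and (name not in changes)):
--             changes[name]="NA"  # for "-" diff the change is "NA" unless there
--                                 # was already a "+" diff for that name
--
--     return changes
-- ===== SOURCE B (Python) =====
-- def secondary_changes(difflist):
--     # Pass 1: last "+" value per name.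
--     positives = {}
--     for d in difflist:
--         if d[0] == "+":
--             positives[d[2:d.find(",")]] = d[d.find(",")+1:]
--     # Pass 2: emit each name once, in first-occurrence order.
--     changes = {}
--     for d in difflist:
--         if d[0] == "+" or d[0] == "-":
--             name = d[2:d.find(",")]
--             if name not in changes:
--                 changes[name] = positives.get(name, "NA")
--     return changes
-- ===== Notes on version B (the rewrite author's own statement) =====
-- stated objective: idiomatic
-- what changed: A does one stateful pass whose '-' branch is guarded by the dict built so far and whose '+' branch overwrites in place; B decomposes this into two independent passes — first collect the last '+' value per name, then emit each '+'/'-' name once in first-occurrence order with positives.get(name, 'NA').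
import Mathlib
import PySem

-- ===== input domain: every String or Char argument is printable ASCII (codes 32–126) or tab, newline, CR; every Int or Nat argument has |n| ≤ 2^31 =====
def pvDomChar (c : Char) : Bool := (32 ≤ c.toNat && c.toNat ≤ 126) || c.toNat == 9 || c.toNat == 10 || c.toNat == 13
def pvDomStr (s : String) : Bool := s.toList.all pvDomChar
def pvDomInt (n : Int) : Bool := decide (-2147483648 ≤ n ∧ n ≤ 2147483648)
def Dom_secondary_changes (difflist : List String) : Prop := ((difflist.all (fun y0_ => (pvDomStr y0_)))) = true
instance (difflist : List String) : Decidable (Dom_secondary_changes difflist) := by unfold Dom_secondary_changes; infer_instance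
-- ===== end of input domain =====

-- B replaces A's single stateful pass (in-place '+' overwrites guarded '-' inserts) by two
-- independent passes: collect last '+' value per name, then emit each name once with
-- positives.get(name, "NA") — idiomatic decomposition, same O(n) cost.

-- ===== PORT A =====
def secondary_changes (difflist : List String) : List (String × String) :=
  (difflist.foldl (fun changes diff =>
    match PySem.Str.pyGet? diff 0 with          -- type = diff[0]; none = IndexError, excluded by Pre_
    | none => changes
    | some ty =>
      let nameDelim := PySem.Str.find diff ","
      let name := PySem.Str.slice diff (some 2) (some nameDelim)
      let values := PySem.Str.slice diff (some (nameDelim + 1)) none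
      if ty = '+' then changes.insert name values
      else if ty = '-' ∧ changes.contains name = false then changes.insert name "NA"
      else changes) PySem.Dict.empty).items

-- ===== PORT B =====
def secondary_changes_alt (difflist : List String) : List (String × String) :=
  -- Pass 1: last "+" value per name.
  let positives : PySem.Dict String String := difflist.foldl (fun p d =>
    match PySem.Str.pyGet? d 0 with             -- d[0]; none = IndexError, excluded by Pre_
    | none => p
    | some ty =>
      if ty = '+' then
        p.insert (PySem.Str.slice d (some 2) (some (PySem.Str.find d ",")))
                 (PySem.Str.slice d (some (PySem.Str.find d "," + 1)) none)
      else p) PySem.Dict.empty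
  -- Pass 2: emit each name once, in first-occurrence order.
  (difflist.foldl (fun changes d =>
    match PySem.Str.pyGet? d 0 with
    | none => changes
    | some ty =>
      if ty = '+' ∨ ty = '-' then
        let name := PySem.Str.slice d (some 2) (some (PySem.Str.find d ","))
        if changes.contains name = false then changes.insert name (positives.getD name "NA")
        else changes
      else changes) PySem.Dict.empty).items

-- ===== PRECONDITION & SPEC =====
-- Pre_: Python A raises IndexError (diff[0]) on any empty-string element; B raises there too.
def Pre_secondary_changes (difflist : List String) : Prop := ∀ d ∈ difflist, d ≠ ""
instance (difflist : List String) : Decidable (Pre_secondary_changes difflist) := by unfold Pre_secondary_changes; infer_instance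
def pvWitness_secondary_changes : List String := ["+ a,1", "- b,2", "+ a,3", "x"]

def Spec_secondary_changes (difflist : List String) (out : List (String × String)) : Prop := out = secondary_changes_alt difflist
instance (difflist : List String) (out : List (String × String)) : Decidable (Spec_secondary_changes difflist out) := by unfold Spec_secondary_changes; infer_instance

-- ===== CLAIM (what is proved, stated in full; the proofs are below) =====
def Claim_equal_secondary_changes : Prop := ∀ (difflist : List String), Dom_secondary_changes difflist → Pre_secondary_changes difflist → Spec_secondary_changes difflist (secondary_changes difflist)

-- ===== LEMMAS AND PROOFS =====

-- Named forms of the three loop bodies, written with the abbreviations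
-- pvTy?/pvName/pvVal; definitionally equal to the lambdas in the ports (pvA_eq/pvB_eq are rfl).
def pvTy? (d : String) : Option Char := PySem.Str.pyGet? d 0
def pvName (d : String) : String := PySem.Str.slice d (some 2) (some (PySem.Str.find d ","))
def pvVal (d : String) : String := PySem.Str.slice d (some (PySem.Str.find d "," + 1)) none

def pvStepA (changes : PySem.Dict String String) (diff : String) : PySem.Dict String String :=
  match pvTy? diff with
  | none => changes
  | some ty =>
    if ty = '+' then changes.insert (pvName diff) (pvVal diff)
    else if ty = '-' ∧ changes.contains (pvName diff) = false then changes.insert (pvName diff) "NA"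
    else changes

def pvStepP (p : PySem.Dict String String) (d : String) : PySem.Dict String String :=
  match pvTy? d with
  | none => p
  | some ty => if ty = '+' then p.insert (pvName d) (pvVal d) else p

def pvStepR (positives : PySem.Dict String String) (changes : PySem.Dict String String) (d : String) : PySem.Dict String String :=
  match pvTy? d with
  | none => changes
  | some ty =>
    if ty = '+' ∨ ty = '-' then
      if changes.contains (pvName d) = false then changes.insert (pvName d) (positives.getD (pvName d) "NA")
      else changes
    else changes

lemma pvA_eq (l : List String) : secondary_changes l = (l.foldl pvStepA PySem.Dict.empty).items := rfl
lemma pvB_eq (l : List String) :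
    secondary_changes_alt l = (l.foldl (pvStepR (l.foldl pvStepP PySem.Dict.empty)) PySem.Dict.empty).items := rfl

-- relevant ('+' or '-') elements and their names
def pvPM (d : String) : Bool := pvTy? d == some '+' || pvTy? d == some '-'
def pvNames (l : List String) : List String := (l.filter pvPM).map pvName
def pvHasPM (k : String) (l : List String) : Bool := l.any (fun d => pvPM d && (pvName d == k))
-- the contribution of one '+' element to name k
def pvF (k d : String) : Option String :=
  if pvTy? d = some '+' ∧ pvName d = k then some (pvVal d) else none
-- the LAST '+' value at name k (tail overrides head)
def pvLastPlus (k : String) : List String → Option String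
  | [] => none
  | d :: l => (pvLastPlus k l).or (pvF k d)

-- keys of an insert = Set.add of the keys
lemma pv_keys_insert_add (d : PySem.Dict String String) (k : String) (v : String) :
    (d.insert k v).keys = PySem.Set.add d.keys k := by
  by_cases h : d.contains k = true
  · rw [PySem.Dict.keys_insert_of_contains d v h,
      PySem.Set.add_of_mem ((PySem.Dict.contains_iff_mem_keys d k).mp h)]
  · have h' : d.contains k = false := by simpa using h
    rw [PySem.Dict.keys_insert_of_not_contains d v h',
      PySem.Set.add_of_not_mem (fun hm => h ((PySem.Dict.contains_iff_mem_keys d k).mpr hm))]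

lemma pv_add_of_contains (d : PySem.Dict String String) (k : String)
    (hc : ¬ d.contains k = false) : PySem.Set.add d.keys k = d.keys :=
  PySem.Set.add_of_mem ((PySem.Dict.contains_iff_mem_keys d k).mp (by simpa using hc))

-- ===== effect of one step on the keys =====
lemma pv_stepA_keys (d : PySem.Dict String String) (x : String) :
    (pvStepA d x).keys = if pvPM x then PySem.Set.add d.keys (pvName x) else d.keys := by
  unfold pvStepA
  cases hty : pvTy? x with
  | none => simp [pvPM, hty]
  | some ty =>
    by_cases hp : ty = '+'
    · simp [pvPM, hty, hp, pv_keys_insert_add]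
    · by_cases hm : ty = '-'
      · by_cases hc : d.contains (pvName x) = false
        · simp [pvPM, hty, hm, hc, pv_keys_insert_add]
        · simp [pvPM, hty, hm, hc, pv_add_of_contains d _ hc]
      · simp [pvPM, hty, hp, hm]

lemma pv_stepR_keys (pos d : PySem.Dict String String) (x : String) :
    (pvStepR pos d x).keys = if pvPM x then PySem.Set.add d.keys (pvName x) else d.keys := by
  unfold pvStepR
  cases hty : pvTy? x with
  | none => simp [pvPM, hty]
  | some ty =>
    by_cases hpm : ty = '+' ∨ ty = '-'
    · have hb : pvPM x = true := by
        rcases hpm with hp | hm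
        · simp [pvPM, hty, hp]
        · simp [pvPM, hty, hm]
      by_cases hc : d.contains (pvName x) = false
      · simp [hpm, hb, hc, pv_keys_insert_add]
      · simp [hpm, hb, hc, pv_add_of_contains d _ hc]
    · have hb : pvPM x = false := by
        have hp : ¬ ty = '+' := fun h => hpm (Or.inl h)
        have hm : ¬ ty = '-' := fun h => hpm (Or.inr h)
        simp [pvPM, hty, hp, hm]
      simp [hpm, hb]

-- ===== keys characterisations =====
lemma pv_keysA (l : List String) : ∀ d : PySem.Dict String String,
    (l.foldl pvStepA d).keys = PySem.Set.update d.keys (pvNames l) := by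
  induction l with
  | nil => intro d; simp [pvNames]
  | cons x l ih =>
    intro d
    rw [List.foldl_cons, ih]
    by_cases hpm : pvPM x = true
    · simp [pvNames, hpm, PySem.Set.update_cons, pv_stepA_keys]
    · simp [pvNames, hpm, pv_stepA_keys]

lemma pv_keysR (pos : PySem.Dict String String) (l : List String) : ∀ d : PySem.Dict String String,
    (l.foldl (pvStepR pos) d).keys = PySem.Set.update d.keys (pvNames l) := by
  induction l with
  | nil => intro d; simp [pvNames]
  | cons x l ih =>
    intro d
    rw [List.foldl_cons, ih]
    by_cases hpm : pvPM x = true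
    · simp [pvNames, hpm, PySem.Set.update_cons, pv_stepR_keys]
    · simp [pvNames, hpm, pv_stepR_keys]

-- ===== effect of one step on a single lookup =====
lemma pv_stepP_get (p : PySem.Dict String String) (x k : String) :
    (pvStepP p x).get? k = (pvF k x).or (p.get? k) := by
  unfold pvStepP
  cases hty : pvTy? x with
  | none => simp [pvF, hty]
  | some ty =>
    by_cases hp : ty = '+'
    · by_cases hn : pvName x = k
      · subst hn
        simp [pvF, hty, hp]
      · have hkn : k ≠ pvName x := fun h => hn h.symm
        simp [pvF, hty, hp, hn, PySem.Dict.get?_insert, hkn]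
    · simp [pvF, hty, hp]

lemma pv_stepA_get_some (d : PySem.Dict String String) (x k w : String) (h : d.get? k = some w) :
    (pvStepA d x).get? k = (pvF k x).or (some w) := by
  unfold pvStepA
  cases hty : pvTy? x with
  | none => simp [pvF, hty, h]
  | some ty =>
    by_cases hp : ty = '+'
    · by_cases hn : pvName x = k
      · subst hn
        simp [pvF, hty, hp]
      · have hkn : k ≠ pvName x := fun hh => hn hh.symm
        simp [pvF, hty, hp, hn, PySem.Dict.get?_insert, hkn, h]
    · by_cases hm : ty = '-'
      · by_cases hc : d.contains (pvName x) = false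
        · by_cases hn : pvName x = k
          · exfalso
            have : d.get? k = none := (PySem.Dict.get?_eq_none_iff_contains d k).mpr (hn ▸ hc)
            simp [h] at this
          · have hkn : k ≠ pvName x := fun hh => hn hh.symm
            simp [pvF, hty, hm, hc, PySem.Dict.get?_insert, hkn, h]
        · simp [pvF, hty, hm, hc, h]
      · simp [pvF, hty, hp, hm, h]

lemma pv_stepA_get_none (d : PySem.Dict String String) (x k : String) (h : d.get? k = none) :
    (pvStepA d x).get? k =
      if pvPM x = true ∧ pvName x = k then
        (if pvTy? x = some '+' then some (pvVal x) else some "NA")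
      else none := by
  unfold pvStepA
  cases hty : pvTy? x with
  | none => simp [pvPM, hty, h]
  | some ty =>
    by_cases hp : ty = '+'
    · by_cases hn : pvName x = k
      · subst hn
        simp [pvPM, hty, hp]
      · have hkn : k ≠ pvName x := fun hh => hn hh.symm
        simp [pvPM, hty, hp, hn, PySem.Dict.get?_insert, hkn, h]
    · by_cases hm : ty = '-'
      · by_cases hn : pvName x = k
        · subst hn
          have hc : d.contains (pvName x) = false :=
            (PySem.Dict.get?_eq_none_iff_contains d _).mp h
          simp [pvPM, hty, hm, hc]
        · have hkn : k ≠ pvName x := fun hh => hn hh.symm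
          by_cases hc : d.contains (pvName x) = false
          · simp [pvPM, hty, hm, hn, hc, PySem.Dict.get?_insert, hkn, h]
          · simp [pvPM, hty, hm, hn, hc, h]
      · simp [pvPM, hty, hp, hm, h]

lemma pv_stepR_get_some (pos d : PySem.Dict String String) (x k w : String) (h : d.get? k = some w) :
    (pvStepR pos d x).get? k = some w := by
  unfold pvStepR
  cases hty : pvTy? x with
  | none => simpa using h
  | some ty =>
    by_cases hpm : ty = '+' ∨ ty = '-'
    · by_cases hn : pvName x = k
      · have hc : ¬ d.contains (pvName x) = false := by
          rw [hn]
          intro hcf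
          have := (PySem.Dict.get?_eq_none_iff_contains d k).mpr hcf
          simp [h] at this
        simp [hpm, hc, h]
      · have hkn : k ≠ pvName x := fun hh => hn hh.symm
        by_cases hc : d.contains (pvName x) = false
        · simp [hpm, hc, PySem.Dict.get?_insert, hkn, h]
        · simp [hpm, hc, h]
    · simp [hpm, h]

lemma pv_stepR_get_none (pos d : PySem.Dict String String) (x k : String) (h : d.get? k = none) :
    (pvStepR pos d x).get? k =
      if pvPM x = true ∧ pvName x = k then some (pos.getD k "NA") else none := by
  unfold pvStepR
  cases hty : pvTy? x with
  | none => simp [pvPM, hty, h]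
  | some ty =>
    by_cases hpm : ty = '+' ∨ ty = '-'
    · have hb : pvPM x = true := by
        rcases hpm with hp | hm
        · simp [pvPM, hty, hp]
        · simp [pvPM, hty, hm]
      by_cases hn : pvName x = k
      · subst hn
        have hc : d.contains (pvName x) = false :=
          (PySem.Dict.get?_eq_none_iff_contains d _).mp h
        simp [hpm, hb, hc]
      · have hkn : k ≠ pvName x := fun hh => hn hh.symm
        by_cases hc : d.contains (pvName x) = false
        · simp [hpm, hb, hn, hc, PySem.Dict.get?_insert, hkn, h]
        · simp [hpm, hb, hn, hc, h]
    · have hb : pvPM x = false := by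
        have hp : ¬ ty = '+' := fun hh => hpm (Or.inl hh)
        have hm : ¬ ty = '-' := fun hh => hpm (Or.inr hh)
        simp [pvPM, hty, hp, hm]
      simp [hpm, hb, h]

-- ===== get? characterisations =====
lemma pv_getP (k : String) (l : List String) : ∀ p : PySem.Dict String String,
    ((l.foldl pvStepP p).get? k) = (pvLastPlus k l).or (p.get? k) := by
  induction l with
  | nil => intro p; simp [pvLastPlus]
  | cons x l ih =>
    intro p
    rw [List.foldl_cons, ih, pv_stepP_get, pvLastPlus, Option.or_assoc]

lemma pv_getA_some (k : String) (l : List String) : ∀ (d : PySem.Dict String String) (w : String),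
    d.get? k = some w → ((l.foldl pvStepA d).get? k) = (pvLastPlus k l).or (some w) := by
  induction l with
  | nil => intro d w h; simpa [pvLastPlus] using h
  | cons x l ih =>
    intro d w h
    rw [List.foldl_cons]
    have hstep := pv_stepA_get_some d x k w h
    cases hF : pvF k x with
    | none =>
      rw [hF, Option.none_or] at hstep
      rw [ih _ w hstep, pvLastPlus, hF, Option.or_none]
    | some v =>
      rw [hF, Option.some_or] at hstep
      rw [ih _ v hstep, pvLastPlus, hF, Option.or_assoc, Option.some_or]

lemma pv_getA_none (k : String) (l : List String) : ∀ d : PySem.Dict String String,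
    d.get? k = none →
    ((l.foldl pvStepA d).get? k) =
      if pvHasPM k l then some ((pvLastPlus k l).getD "NA") else none := by
  induction l with
  | nil => intro d h; simpa [pvHasPM, pvLastPlus] using h
  | cons x l ih =>
    intro d h
    rw [List.foldl_cons]
    have hstep := pv_stepA_get_none d x k h
    by_cases hpm : pvPM x = true ∧ pvName x = k
    · have hany : pvHasPM k (x :: l) = true := by
        simp [pvHasPM, List.any_cons, hpm.1, hpm.2]
      rw [hany, if_pos rfl]
      by_cases hp : pvTy? x = some '+'
      · rw [if_pos hpm, if_pos hp] at hstep
        rw [pv_getA_some k l _ _ hstep]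
        have hFx : pvF k x = some (pvVal x) := by simp [pvF, hp, hpm.2]
        rw [pvLastPlus, hFx]
        cases hL : pvLastPlus k l with
        | none => simp
        | some u => simp
      · rw [if_pos hpm, if_neg hp] at hstep
        rw [pv_getA_some k l _ _ hstep]
        have hFx : pvF k x = none := by simp [pvF, hp]
        rw [pvLastPlus, hFx, Option.or_none]
        cases hL : pvLastPlus k l with
        | none => simp
        | some u => simp
    · have hstep' : (pvStepA d x).get? k = none := by rw [hstep, if_neg hpm]
      have hany : pvHasPM k (x :: l) = pvHasPM k l := by
        rcases Classical.em (pvPM x = true) with hb | hb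
        · have hn : ¬ pvName x = k := fun hh => hpm ⟨hb, hh⟩
          simp [pvHasPM, List.any_cons, hn]
        · simp [pvHasPM, List.any_cons, Bool.eq_false_iff.mpr hb]
      have hFx : pvF k x = none := by
        by_cases hp : pvTy? x = some '+'
        · have hb : pvPM x = true := by simp [pvPM, hp]
          have hn : ¬ pvName x = k := fun hh => hpm ⟨hb, hh⟩
          simp [pvF, hn]
        · simp [pvF, hp]
      rw [ih _ hstep', hany, pvLastPlus, hFx, Option.or_none]

lemma pv_getR_some (pos : PySem.Dict String String) (k : String) (l : List String) :
    ∀ (d : PySem.Dict String String) (w : String),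
    d.get? k = some w → ((l.foldl (pvStepR pos) d).get? k) = some w := by
  induction l with
  | nil => intro d w h; simpa using h
  | cons x l ih =>
    intro d w h
    rw [List.foldl_cons]
    exact ih _ w (pv_stepR_get_some pos d x k w h)

lemma pv_getR_none (pos : PySem.Dict String String) (k : String) (l : List String) :
    ∀ d : PySem.Dict String String,
    d.get? k = none →
    ((l.foldl (pvStepR pos) d).get? k) =
      if pvHasPM k l then some (pos.getD k "NA") else none := by
  induction l with
  | nil => intro d h; simpa [pvHasPM] using h
  | cons x l ih =>
    intro d h
    rw [List.foldl_cons]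
    have hstep := pv_stepR_get_none pos d x k h
    by_cases hpm : pvPM x = true ∧ pvName x = k
    · have hany : pvHasPM k (x :: l) = true := by
        simp [pvHasPM, List.any_cons, hpm.1, hpm.2]
      rw [hany, if_pos rfl, if_pos hpm] at *
      exact pv_getR_some pos k l _ _ hstep
    · have hstep' : (pvStepR pos d x).get? k = none := by rw [hstep, if_neg hpm]
      have hany : pvHasPM k (x :: l) = pvHasPM k l := by
        rcases Classical.em (pvPM x = true) with hb | hb
        · have hn : ¬ pvName x = k := fun hh => hpm ⟨hb, hh⟩
          simp [pvHasPM, List.any_cons, hn]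
        · simp [pvHasPM, List.any_cons, Bool.eq_false_iff.mpr hb]
      rw [ih _ hstep', hany]

-- ===== VERDICT (by name: the statement is the Claim_ definition above) =====
theorem secondary_changes_spec : Claim_equal_secondary_changes := by
  intro l _ _
  unfold Spec_secondary_changes
  rw [pvA_eq, pvB_eq]
  set pos := l.foldl pvStepP PySem.Dict.empty with hpos
  have hkA : (l.foldl pvStepA PySem.Dict.empty).keys = PySem.Set.ofList (pvNames l) := by
    rw [pv_keysA l PySem.Dict.empty, PySem.Dict.keys_empty, PySem.Set.update_nil_left]
  have hkR : (l.foldl (pvStepR pos) PySem.Dict.empty).keys = PySem.Set.ofList (pvNames l) := by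
    rw [pv_keysR pos l PySem.Dict.empty, PySem.Dict.keys_empty, PySem.Set.update_nil_left]
  have hget : ∀ k, (l.foldl pvStepA PySem.Dict.empty).get? k
      = (l.foldl (pvStepR pos) PySem.Dict.empty).get? k := by
    intro k
    rw [pv_getA_none k l PySem.Dict.empty (PySem.Dict.get?_empty k),
      pv_getR_none pos k l PySem.Dict.empty (PySem.Dict.get?_empty k)]
    have : pos.getD k "NA" = (pvLastPlus k l).getD "NA" := by
      rw [PySem.Dict.getD_eq_get?_getD, hpos, pv_getP k l PySem.Dict.empty,
        PySem.Dict.get?_empty, Option.or_none]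
    rw [this]
  rw [PySem.Dict.items_eq_map_keys _ (by rw [hkA]; exact PySem.Set.nodup_ofList _) "NA",
    PySem.Dict.items_eq_map_keys _ (by rw [hkR]; exact PySem.Set.nodup_ofList _) "NA",
    hkA, hkR]
  exact List.map_congr_left (fun k _ => by
    rw [PySem.Dict.getD_eq_get?_getD, PySem.Dict.getD_eq_get?_getD, hget k])
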